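-- pv_equiv track=rewrite | github.com/dipenvekaria/quotepro | python-backend/routers/catalog_import.py | parse_csv_smart
-- ===== SOURCE A (Python) =====
-- from typing import Dict, List, Optional, Any
--
-- def parse_csv_smart(csv_text: str) -> tuple[List[str], List[Dict]]:
--     """
--     Smart CSV parser that handles:
--     - Empty first rows
--     - Empty columns
--     - Header detection
--     """
--     lines = csv_text.strip().split('\n')
--
--     # Find header row (first row with at least 2 non-empty values)
--     header_row_idx = 0
--     for i, line in enumerate(lines):
--         values = [v.strip().strip('"') for v in line.split(',')]
--         non_empty = [v for v in values if v]
--         if len(non_empty) >= 2: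
--             header_row_idx = i
--             break
--
--     # Parse header row
--     raw_headers = [v.strip().strip('"') for v in lines[header_row_idx].split(',')]
--
--     # Find valid column indices (non-empty headers)
--     valid_indices = []
--     headers = []
--     for i, h in enumerate(raw_headers):
--         if h:
--             valid_indices.append(i)
--             headers.append(h)
--
--     if not headers:
--         return [], []
--
--     # Parse data rows
--     rows = []
--     for line in lines[header_row_idx + 1:]:
--         if not line.strip():
--             continue
--         values = [v.strip().strip('"') for v in line.split(',')]
--         row = {}
--         for idx, header in enumerate(headers):
--             orig_idx = valid_indices[idx]
--             row[header] = values[orig_idx] if orig_idx < len(values) else ''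
--         # Skip empty rows
--         if any(v for v in row.values()):
--             rows.append(row)
--
--     return headers, rows
-- ===== SOURCE B (Python) =====
-- def parse_csv_smart(csv_text):
--     lines = csv_text.strip().split('\n')
--
--     def cells(line):
--         return [v.strip().strip('"') for v in line.split(',')]
--
--     # header = first line with at least 2 non-empty cleaned values, else line 0
--     idx = next((i for i, line in enumerate(lines)
--                 if sum(1 for v in cells(line) if v) >= 2), 0)
--
--     raw = cells(lines[idx])
--     headers = [h for h in raw if h]
--     if not headers:
--         return [], []
--
--     # column-major: materialise each kept column as the list of its cells down all data rows
--     data = [cells(line) for line in lines[idx + 1:] if line.strip()]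
--     columns = [[r[j] if j < len(r) else '' for r in data]
--                for j, h in enumerate(raw) if h]
--
--     # transpose the columns back into rows and drop all-empty rows
--     rows = [dict(zip(headers, tup)) for tup in zip(*columns)]
--     return headers, [row for row in rows if any(row.values())]
-- ===== Notes on version B (the rewrite author's own statement) =====
-- stated objective: alternative
-- what changed: B replaces A's row-major loop with its valid_indices table by a column-major construction: it materialises each kept column as a list of cells down all data rows, transposes the columns back into rows with zip(*columns), and builds each row dict by zipping headers against the transposed tuple, filtering all-empty rows at the end.
import Mathlib
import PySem

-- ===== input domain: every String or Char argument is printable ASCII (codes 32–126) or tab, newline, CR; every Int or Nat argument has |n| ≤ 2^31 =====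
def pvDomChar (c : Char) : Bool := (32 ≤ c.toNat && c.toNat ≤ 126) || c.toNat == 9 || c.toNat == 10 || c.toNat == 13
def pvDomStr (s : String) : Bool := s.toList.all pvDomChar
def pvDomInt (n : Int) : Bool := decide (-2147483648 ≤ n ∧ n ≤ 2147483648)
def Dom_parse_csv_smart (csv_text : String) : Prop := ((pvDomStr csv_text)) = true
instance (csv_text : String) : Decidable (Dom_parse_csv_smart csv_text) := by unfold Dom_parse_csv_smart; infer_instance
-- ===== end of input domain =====

-- B rebuilds the table column-major: each kept column is materialised down all data rows,
-- then transposed back into rows (alternative algorithm of the same cost).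


-- ===== PORT A =====
-- [v.strip().strip('"') for v in line.split(',')]  (A repeats this comprehension three times)
def pvValsA (line : String) : List String :=
  ((PySem.Str.split? line ",").getD []).map (fun v => PySem.Str.stripChars (PySem.Str.strip v) "\"")

-- A's header-detection loop with break (header_row_idx stays 0 if no line qualifies)
def pvFindHeaderA : List (Int × String) → Int
  | [] => 0
  | (i, line) :: rest =>
      if 2 ≤ ((pvValsA line).filter (fun v => v ≠ "")).length then i else pvFindHeaderA rest

-- A's valid_indices/headers accumulating loop
def pvVHA (raw_headers : List String) : List Int × List String :=
  (PySem.List.enumerate raw_headers).foldl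
    (fun acc p => if p.2 ≠ "" then (acc.1 ++ [p.1], acc.2 ++ [p.2]) else acc)
    (([] : List Int), ([] : List String))

-- A's inner per-row loop (orig_idx = valid_indices[idx], always in range)
def pvDictA (valid_indices : List Int) (headers : List String) (values : List String) :
    PySem.Dict String String :=
  (PySem.List.enumerate headers).foldl
    (fun row q =>
      row.insert q.2
        (if PySem.List.pyGetD valid_indices q.1 0 < (values.length : Int)
         then PySem.List.pyGetD values (PySem.List.pyGetD valid_indices q.1 0) "" else ""))
    PySem.Dict.empty

-- A's data-row loop (continue on blank lines, skip empty rows)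
def pvRowsA (valid_indices : List Int) (headers : List String) (tailLines : List String) :
    List (List (String × String)) :=
  tailLines.foldl
    (fun rows line =>
      if PySem.Str.strip line = "" then rows
      else
        if (pvDictA valid_indices headers (pvValsA line)).values.any (fun v => v ≠ "") = true
        then rows ++ [(pvDictA valid_indices headers (pvValsA line)).items] else rows)
    []

def pvMainA (lines : List String) : List String × (List (List (String × String))) :=
  let header_row_idx := pvFindHeaderA (PySem.List.enumerate lines)
  -- lines[header_row_idx]: always in range (lines is nonempty and a found index is valid)
  let raw_headers := pvValsA (PySem.List.pyGetD lines header_row_idx "")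
  let vh := pvVHA raw_headers
  if vh.2 = [] then ([], [])
  else (vh.2, pvRowsA vh.1 vh.2 (PySem.List.slice lines (some (header_row_idx + 1)) none))

def parse_csv_smart (csv_text : String) : List String × (List (List (String × String))) :=
  pvMainA ((PySem.Str.split? (PySem.Str.strip csv_text) "\n").getD [])

-- ===== PORT B =====
def pvCellsB (line : String) : List String :=
  ((PySem.Str.split? line ",").getD []).map (fun v => PySem.Str.stripChars (PySem.Str.strip v) "\"")

-- sum(1 for v in cells(line) if v) >= 2
def pvIsHeaderB (line : String) : Bool :=
  decide (2 ≤ (pvCellsB line).countP (fun v => v ≠ ""))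

-- r[j] if j < len(r) else ''
def pvColValB (j : Int) (r : List String) : String :=
  if j < (r.length : Int) then PySem.List.pyGetD r j "" else ""

-- [[r[j] if j < len(r) else '' for r in data] for j, h in enumerate(raw) if h]
def pvColumnsB (raw : List String) (data : List (List String)) : List (List String) :=
  ((PySem.List.enumerate raw).filter (fun p => p.2 ≠ "")).map
    (fun p => data.map (pvColValB p.1))

-- zip(*columns): heads of all columns, then recurse on the tails
def pvZipStarB (cols : List (List String)) : List (List String) :=
  if h : cols = [] ∨ cols.any (fun c => c.isEmpty) then []
  else cols.map (fun c => c.headD "") :: pvZipStarB (cols.map (fun c => c.tail))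
termination_by (cols.headD []).length
decreasing_by
  rw [not_or] at h
  obtain ⟨h1, h2⟩ := h
  cases cols with
  | nil => exact absurd rfl h1
  | cons c cs =>
    have hc : c ≠ [] := by
      intro e
      subst e
      simp at h2
    simp only [List.map_cons, List.headD_cons]
    cases c with
    | nil => exact absurd rfl hc
    | cons a t => simp

-- dict(zip(headers, tup))
def pvDictZipB (headers tup : List String) : PySem.Dict String String :=
  (headers.zip tup).foldl (fun d p => d.insert p.1 p.2) PySem.Dict.empty

def pvMainB (lines : List String) : List String × (List (List (String × String))) :=
  let idx := (lines.findIdx? pvIsHeaderB).getD 0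
  let raw := pvCellsB (lines.getD idx "")
  let headers := raw.filter (fun h => h ≠ "")
  if headers = [] then ([], [])
  else
    let data := ((lines.drop (idx + 1)).filter (fun l => ¬ PySem.Str.strip l = "")).map pvCellsB
    let rowsD := (pvZipStarB (pvColumnsB raw data)).map (fun tup => pvDictZipB headers tup)
    (headers, (rowsD.filter (fun d => d.values.any (fun v => v ≠ ""))).map (fun d => d.items))

def parse_csv_smart_alt (csv_text : String) : List String × (List (List (String × String))) :=
  pvMainB ((PySem.Str.split? (PySem.Str.strip csv_text) "\n").getD [])

-- ===== PRECONDITION & SPEC =====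
def Spec_parse_csv_smart (csv_text : String) (out : List String × (List (List (String × String)))) : Prop := out = parse_csv_smart_alt csv_text
instance (csv_text : String) (out : List String × (List (List (String × String)))) : Decidable (Spec_parse_csv_smart csv_text out) := by unfold Spec_parse_csv_smart; infer_instance

-- ===== CLAIM (what is proved, stated in full; the proofs are below) =====
def Claim_equal_parse_csv_smart : Prop := ∀ (csv_text : String), Dom_parse_csv_smart csv_text → Spec_parse_csv_smart csv_text (parse_csv_smart csv_text)

-- ===== LEMMAS AND PROOFS =====

theorem pv_find_header (ls : List String) (s : Int) :
    pvFindHeaderA (PySem.List.enumerate ls s) =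
      match ls.findIdx? pvIsHeaderB with
      | some i => s + (i : Int)
      | none => 0 := by
  induction ls generalizing s with
  | nil =>
    rw [PySem.List.enumerate_nil]
    rfl
  | cons x t ih =>
    rw [PySem.List.enumerate_cons]
    simp only [pvFindHeaderA]
    rw [show pvValsA = pvCellsB from rfl]
    rw [List.findIdx?_cons]
    cases hb : pvIsHeaderB x with
    | true =>
      have h : 2 ≤ ((pvCellsB x).filter (fun v => v ≠ "")).length := by
        have := hb
        simp only [pvIsHeaderB, decide_eq_true_eq, List.countP_eq_length_filter] at this
        exact this
      rw [if_pos h]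
      simp
    | false =>
      have h : ¬ 2 ≤ ((pvCellsB x).filter (fun v => v ≠ "")).length := by
        have := hb
        simp only [pvIsHeaderB, decide_eq_false_iff_not, List.countP_eq_length_filter] at this
        exact this
      rw [if_neg h, ih]
      cases hf : t.findIdx? pvIsHeaderB with
      | none =>
        rw [if_neg (by simp : ¬ (false = true))]
        rfl
      | some i =>
        rw [if_neg (by simp : ¬ (false = true))]
        show s + 1 + (i : Int) = s + ((i + 1 : Nat) : Int)
        push_cast
        ring

theorem pv_vh_fold (l : List (Int × String)) (a : List Int) (b : List String) :
    l.foldl (fun acc p => if p.2 ≠ "" then (acc.1 ++ [p.1], acc.2 ++ [p.2]) else acc) (a, b) =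
      (a ++ ((l.filter (fun p => p.2 ≠ "")).map (fun p => p.1)),
       b ++ ((l.filter (fun p => p.2 ≠ "")).map (fun p => p.2))) := by
  induction l generalizing a b with
  | nil => simp
  | cons x t ih =>
    rw [List.foldl_cons, List.filter_cons]
    by_cases h : x.2 = ""
    · rw [if_neg (by simp [h]), if_neg (by simp [h])]
      exact ih a b
    · rw [if_pos (show x.2 ≠ "" from h), if_pos (by simp [h])]
      rw [ih]
      simp

theorem pv_vha_eq (raw : List String) :
    pvVHA raw =
      (((PySem.List.enumerate raw).filter (fun p => p.2 ≠ "")).map (fun p => p.1),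
       ((PySem.List.enumerate raw).filter (fun p => p.2 ≠ "")).map (fun p => p.2)) := by
  unfold pvVHA
  rw [pv_vh_fold]
  simp

theorem pv_headers_eq (raw : List String) (s : Int) :
    ((PySem.List.enumerate raw s).filter (fun p => p.2 ≠ "")).map (fun p => p.2) =
      raw.filter (fun h => h ≠ "") := by
  induction raw generalizing s with
  | nil => simp [PySem.List.enumerate_nil]
  | cons x t ih =>
    rw [PySem.List.enumerate_cons, List.filter_cons, List.filter_cons]
    by_cases h : x = ""
    · rw [if_neg (by simp [h]), if_neg (by simp [h])]
      exact ih (s + 1)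
    · rw [if_pos (by simp [h]), if_pos (by simp [h]), List.map_cons]
      dsimp only
      rw [ih]

-- A's enumerate-over-headers fold, re-indexed as a fold over the filtered pairs
theorem pv_inner_fold (vi : List (Int × String)) (values : List String)
    (front : List Int) (d : PySem.Dict String String) :
    (PySem.List.enumerate (vi.map (fun p => p.2)) (front.length : Int)).foldl
      (fun row q =>
        row.insert q.2
          (if PySem.List.pyGetD (front ++ vi.map (fun p => p.1)) q.1 0 < (values.length : Int)
           then PySem.List.pyGetD values (PySem.List.pyGetD (front ++ vi.map (fun p => p.1)) q.1 0) ""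
           else "")) d =
    vi.foldl
      (fun row p =>
        row.insert p.2 (if p.1 < (values.length : Int) then PySem.List.pyGetD values p.1 "" else ""))
      d := by
  induction vi generalizing front d with
  | nil => simp [PySem.List.enumerate_nil]
  | cons x t ih =>
    rw [List.map_cons, List.map_cons, PySem.List.enumerate_cons, List.foldl_cons, List.foldl_cons]
    have hget : PySem.List.pyGetD (front ++ x.1 :: t.map (fun p => p.1)) ((front.length : Nat) : Int) 0 = x.1 := by
      rw [PySem.List.pyGetD_natCast, List.getD_eq_getElem?_getD,
        List.getElem?_append_right (Nat.le_refl front.length)]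
      simp
    dsimp only
    rw [hget]
    have hlen : ((front.length : Int) + 1) = (((front ++ [x.1]).length : Nat) : Int) := by simp
    rw [hlen, List.append_cons front x.1 (t.map (fun p => p.1))]
    exact ih (front ++ [x.1]) _

-- A's per-row dict equals B's dict(zip(headers, transposed tuple)) for the same line
theorem pv_dict_eq (fp : List (Int × String)) (values : List String) :
    pvDictA (fp.map (fun p => p.1)) (fp.map (fun p => p.2)) values =
      pvDictZipB (fp.map (fun p => p.2)) (fp.map (fun p => pvColValB p.1 values)) := by
  unfold pvDictA pvDictZipB
  have h0 := pv_inner_fold fp values [] PySem.Dict.empty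
  simp only [List.length_nil, Nat.cast_zero, List.nil_append] at h0
  rw [h0, List.zip_map', List.foldl_map]
  rfl

-- zip(*columns) of per-column maps over the same data is the row-major map (columns nonempty)
theorem pv_zipstar_eq {α : Type} (L : List α) (hL : L ≠ []) (f : α → List String → String) :
    ∀ (data : List (List String)),
      pvZipStarB (L.map (fun a => data.map (f a))) =
        data.map (fun r => L.map (fun a => f a r)) := by
  intro data
  induction data with
  | nil =>
    rw [pvZipStarB]
    rw [dif_pos]
    · simp
    · right
      cases L with
      | nil => exact absurd rfl hL
      | cons a t => simp
  | cons r rest ih =>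
    rw [pvZipStarB]
    rw [dif_neg]
    · have hheads : (L.map (fun a => (r :: rest).map (f a))).map (fun c => c.headD "") =
          L.map (fun a => f a r) := by
        rw [List.map_map]; rfl
      have htails : (L.map (fun a => (r :: rest).map (f a))).map (fun c => c.tail) =
          L.map (fun a => rest.map (f a)) := by
        rw [List.map_map]; rfl
      rw [hheads, htails, ih]
      rfl
    · rw [not_or]
      constructor
      · cases L with
        | nil => exact absurd rfl hL
        | cons a t => simp
      · simp

-- A's data-row fold = filter blanks, map to dicts, filter empties, take items
theorem pv_rows_fold (vi : List Int) (hs : List String) (tail : List String)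
    (acc : List (List (String × String))) :
    tail.foldl
      (fun rows line =>
        if PySem.Str.strip line = "" then rows
        else
          if (pvDictA vi hs (pvValsA line)).values.any (fun v => v ≠ "") = true
          then rows ++ [(pvDictA vi hs (pvValsA line)).items] else rows)
      acc =
    acc ++ ((((tail.filter (fun l => ¬ PySem.Str.strip l = "")).map
        (fun l => pvDictA vi hs (pvValsA l))).filter
        (fun d => d.values.any (fun v => v ≠ ""))).map (fun d => d.items)) := by
  induction tail generalizing acc with
  | nil => simp
  | cons x t ih =>
    rw [List.foldl_cons, List.filter_cons]
    by_cases hx : PySem.Str.strip x = ""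
    · rw [if_pos hx, if_neg (by simp [hx])]
      exact ih acc
    · rw [if_neg hx, if_pos (show (decide (¬PySem.Str.strip x = "")) = true by simp [hx])]
      simp only [List.map_cons, List.filter_cons]
      by_cases hb : ((pvDictA vi hs (pvValsA x)).values.any (fun v => v ≠ "")) = true
      · rw [if_pos hb, if_pos hb, List.map_cons, ih]
        simp
      · rw [if_neg hb, if_neg hb]
        exact ih acc

theorem pv_rows_eq (raw : List String) (tail : List String)
    (hne : raw.filter (fun h => h ≠ "") ≠ []) :
    pvRowsA (((PySem.List.enumerate raw).filter (fun p => p.2 ≠ "")).map (fun p => p.1))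
            (raw.filter (fun h => h ≠ ""))
            tail =
    (((pvZipStarB (pvColumnsB raw ((tail.filter (fun l => ¬ PySem.Str.strip l = "")).map pvCellsB))).map
       (fun tup => pvDictZipB (raw.filter (fun h => h ≠ "")) tup)).filter
       (fun d => d.values.any (fun v => v ≠ ""))).map (fun d => d.items) := by
  set fp := (PySem.List.enumerate raw).filter (fun p => p.2 ≠ "") with hfp
  have hfpne : fp ≠ [] := by
    intro h
    apply hne
    rw [← pv_headers_eq raw 0, ← hfp, h]
    rfl
  have hh : fp.map (fun p => p.2) = raw.filter (fun h => h ≠ "") := by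
    rw [hfp]; exact pv_headers_eq raw 0
  rw [← hh]
  unfold pvRowsA
  rw [pv_rows_fold, List.nil_append]
  unfold pvColumnsB
  rw [← hfp, pv_zipstar_eq fp hfpne (fun p r => pvColValB p.1 r)]
  rw [List.map_map, List.map_map]
  refine congrArg _ (congrArg _ (List.map_congr_left ?_))
  intro l _
  show pvDictA (fp.map (fun p => p.1)) (fp.map (fun p => p.2)) (pvValsA l) = _
  dsimp only [Function.comp]
  rw [show pvValsA = pvCellsB from rfl, pv_dict_eq fp (pvCellsB l)]

theorem pv_slice_drop (lines : List String) (n : Nat) :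
    PySem.List.slice lines (some ((n : Int) + 1)) none = lines.drop (n + 1) := by
  rw [PySem.List.slice_from lines (by positivity : (0 : Int) ≤ (n : Int) + 1)]
  congr 1

theorem pv_build_eq (lines : List String) (n : Nat) :
    (let raw_headers := pvCellsB (PySem.List.pyGetD lines (n : Int) "")
     let vh := pvVHA raw_headers
     if vh.2 = [] then (([] : List String), ([] : List (List (String × String))))
     else (vh.2, pvRowsA vh.1 vh.2 (PySem.List.slice lines (some ((n : Int) + 1)) none))) =
    (let raw := pvCellsB (lines.getD n "")
     let headers := raw.filter (fun h => h ≠ "")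
     if headers = [] then ([], [])
     else
       let data := ((lines.drop (n + 1)).filter (fun l => ¬ PySem.Str.strip l = "")).map pvCellsB
       let rowsD := (pvZipStarB (pvColumnsB raw data)).map (fun tup => pvDictZipB headers tup)
       (headers, (rowsD.filter (fun d => d.values.any (fun v => v ≠ ""))).map (fun d => d.items))) := by
  simp only [PySem.List.pyGetD_natCast]
  rw [pv_vha_eq]
  dsimp only
  rw [pv_headers_eq]
  by_cases h : (pvCellsB (lines.getD n "")).filter (fun h => h ≠ "") = []
  · rw [if_pos h, if_pos h]
  · rw [if_neg h, if_neg h, pv_slice_drop, pv_rows_eq _ _ h]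

theorem pv_main_eq (lines : List String) : pvMainA lines = pvMainB lines := by
  simp only [pvMainA, pvMainB]
  rw [show pvValsA = pvCellsB from rfl, pv_find_header]
  cases hf : lines.findIdx? pvIsHeaderB with
  | none => simpa using pv_build_eq lines 0
  | some i => simpa using pv_build_eq lines i

-- ===== VERDICT (by name: the statement is the Claim_ definition above) =====
theorem parse_csv_smart_spec : Claim_equal_parse_csv_smart := by
  intro csv_text _
  unfold Spec_parse_csv_smart parse_csv_smart parse_csv_smart_alt
  exact pv_main_eq _
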